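-- pv_equiv track=rewrite | github.com/majin-sajjad/danny_bot | scoring_system.py | _evaluate_solar_expertise
-- ===== SOURCE A (Python) =====
-- from typing import Dict, List, Tuple, Optional
--
-- def _evaluate_solar_expertise(messages: List[Dict]) -> int:
--     """Evaluate solar-specific expertise"""
--     score = 50
--     solar_terms = ['solar', 'panels', 'photovoltaic', 'pv', 'renewable', 'energy', 'installation', 'system', 'grid', 'metering']
--     all_text = ' '.join([msg['content'].lower() for msg in messages])
--
--     for term in solar_terms:
--         if term in all_text:
--             score += 5
--
--     return min(score, 100)
-- ===== SOURCE B (Python) =====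
-- from typing import Dict, List, Tuple, Optional
--
-- def _evaluate_solar_expertise(messages: List[Dict]) -> int:
--     """Evaluate solar-specific expertise"""
--     solar_terms = ['solar', 'panels', 'photovoltaic', 'pv', 'renewable', 'energy', 'installation', 'system', 'grid', 'metering']
--     found = set()
--     for msg in messages:
--         text = msg['content'].lower()
--         for term in solar_terms:
--             if term not in found and term in text:
--                 found.add(term)
--     return min(50 + 5 * len(found), 100)
-- ===== Notes on version B (the rewrite author's own statement) =====
-- stated objective: alternative
-- what changed: B never builds the concatenated all_text string: it makes one pass over the messages, accumulating the distinct matched terms into a set (skipping terms already found), and scores 50+5*len(found) at the end; correct because no term contains the join separator, so a term is in the concatenation iff it is in some single message.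
import Mathlib
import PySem

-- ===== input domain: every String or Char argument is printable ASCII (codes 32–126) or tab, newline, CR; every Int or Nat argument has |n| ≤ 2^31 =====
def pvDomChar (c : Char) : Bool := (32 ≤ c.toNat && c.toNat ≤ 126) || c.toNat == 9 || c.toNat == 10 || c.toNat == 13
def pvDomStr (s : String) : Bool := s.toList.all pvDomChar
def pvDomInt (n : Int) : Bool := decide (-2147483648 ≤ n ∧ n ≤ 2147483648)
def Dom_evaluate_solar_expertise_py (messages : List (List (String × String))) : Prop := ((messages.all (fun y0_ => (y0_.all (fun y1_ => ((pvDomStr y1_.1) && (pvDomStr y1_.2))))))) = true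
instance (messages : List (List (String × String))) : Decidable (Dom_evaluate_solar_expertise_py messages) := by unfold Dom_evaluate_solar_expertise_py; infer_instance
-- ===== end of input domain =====

-- B makes one pass over the messages, accumulating the distinct matched terms into a set
-- (skipping terms already found) and scoring 50 + 5*len(found) at the end, instead of A's
-- concatenate-all-text-then-scan-each-term strategy (equal because no term contains the join separator).
-- A raises KeyError when a message lacks the 'content' key; Pre_ excludes exactly those inputs (B raises there too).


-- ===== PORT A =====
-- the shared literal list of solar terms (pure data, used by both ports)
def pvSolarTerms : List String :=
  ["solar", "panels", "photovoltaic", "pv", "renewable", "energy", "installation", "system", "grid", "metering"]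

-- msg['content']: Dict lookup; none = KeyError, excluded by Pre_ (getD "" is the total stand-in)
def pvContent (msg : List (String × String)) : String :=
  ((PySem.Dict.mk msg).get? "content").getD ""

def evaluate_solar_expertise_py (messages : List (List (String × String))) : Int :=
  let all_text := PySem.Str.join " " (messages.map (fun msg => PySem.Str.lower (pvContent msg)))
  let score := pvSolarTerms.foldl
    (fun score term => if PySem.Str.isIn term all_text then score + 5 else score) 50
  min score 100

-- ===== PORT B =====
def evaluate_solar_expertise_py_alt (messages : List (List (String × String))) : Int :=
  let found : PySem.Set String :=
    messages.foldl
      (fun found msg =>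
        let text := PySem.Str.lower (pvContent msg)
        pvSolarTerms.foldl
          (fun found term =>
            if !(PySem.Set.contains found term) && PySem.Str.isIn term text
            then PySem.Set.add found term else found)
          found)
      PySem.Set.empty
  min (50 + 5 * PySem.Set.len found) 100

-- ===== PRECONDITION & SPEC =====
-- Pre_ excludes exactly the inputs where msg['content'] raises KeyError (a message without that key)
def Pre_evaluate_solar_expertise_py (messages : List (List (String × String))) : Prop :=
  ∀ msg ∈ messages, ((PySem.Dict.mk msg).get? "content").isSome = true
instance (messages : List (List (String × String))) : Decidable (Pre_evaluate_solar_expertise_py messages) := by unfold Pre_evaluate_solar_expertise_py; infer_instance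

def pvWitness_evaluate_solar_expertise_py : (List (List (String × String))) :=
  [[("content", "We install Solar panels on the grid")], [("content", "net metering")]]

def Spec_evaluate_solar_expertise_py (messages : List (List (String × String))) (out : Int) : Prop := out = evaluate_solar_expertise_py_alt messages
instance (messages : List (List (String × String))) (out : Int) : Decidable (Spec_evaluate_solar_expertise_py messages out) := by unfold Spec_evaluate_solar_expertise_py; infer_instance

-- ===== CLAIM (what is proved, stated in full; the proofs are below) =====
def Claim_equal_evaluate_solar_expertise_py : Prop := ∀ (messages : List (List (String × String))), Dom_evaluate_solar_expertise_py messages → Pre_evaluate_solar_expertise_py messages → Spec_evaluate_solar_expertise_py messages (evaluate_solar_expertise_py messages)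

-- ===== LEMMAS AND PROOFS =====

-- a space-free list is a prefix of `a ++ ' ' :: b` only if it is a prefix of `a`
theorem pv_prefix_nospace (t : List Char) (hs : ' ' ∉ t) :
    ∀ a b : List Char, t <+: a ++ ' ' :: b → t <+: a := by
  induction t with
  | nil => intro a b _; exact List.nil_prefix
  | cons c t ih =>
    intro a b h
    cases a with
    | nil =>
      exfalso
      obtain ⟨r, hr⟩ := h
      simp only [List.nil_append, List.cons_append, List.cons.injEq] at hr
      exact hs (hr.1 ▸ List.mem_cons_self)
    | cons x a' =>
      obtain ⟨r, hr⟩ := h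
      simp only [List.cons_append, List.cons.injEq] at hr
      obtain ⟨hx, hrest⟩ := hr
      have : t <+: a' := ih (fun hm => hs (List.mem_cons_of_mem _ hm)) a' b ⟨r, hrest⟩
      exact hx ▸ List.cons_prefix_cons.mpr ⟨rfl, this⟩

-- a nonempty space-free list is an infix of `l₁ ++ ' ' :: l₂` iff it is an infix of one side
theorem pv_infix_nospace (t : List Char) (hs : ' ' ∉ t) (hne : t ≠ []) :
    ∀ l₁ l₂ : List Char, (t <:+: l₁ ++ ' ' :: l₂ ↔ t <:+: l₁ ∨ t <:+: l₂) := by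
  intro l₁
  induction l₁ with
  | nil =>
    intro l₂
    simp only [List.nil_append, List.infix_cons_iff]
    constructor
    · rintro (hp | hi)
      · exfalso
        cases t with
        | nil => exact hne rfl
        | cons c t' =>
          obtain ⟨r, hr⟩ := hp
          simp only [List.cons_append, List.cons.injEq] at hr
          exact hs (hr.1 ▸ List.mem_cons_self)
      · exact Or.inr hi
    · rintro (h | h)
      · exact absurd (List.eq_nil_of_infix_nil h) hne
      · exact Or.inr h
  | cons x l₁' ih =>
    intro l₂
    simp only [List.cons_append]
    constructor
    · intro h
      rcases List.infix_cons_iff.mp h with hp | hi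
      · exact Or.inl (List.IsPrefix.isInfix
          (pv_prefix_nospace t hs (x :: l₁') l₂ (by simpa using hp)))
      · rcases (ih l₂).mp hi with h' | h'
        · exact Or.inl (List.infix_cons_iff.mpr (Or.inr h'))
        · exact Or.inr h'
    · rintro (h | h)
      · rcases List.infix_cons_iff.mp h with hp | hi
        · exact List.IsPrefix.isInfix (hp.trans (List.prefix_append _ _))
        · exact List.infix_cons_iff.mpr (Or.inr ((ih l₂).mpr (Or.inl hi)))
      · exact List.infix_cons_iff.mpr (Or.inr ((ih l₂).mpr (Or.inr h)))

-- a nonempty space-free term is in ' '.join(texts) iff it is in some single text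
theorem pv_isIn_join (t : List Char) (hs : ' ' ∉ t) (hne : t ≠ []) :
    ∀ texts : List (List Char),
      PySem.Chars.isIn t (PySem.Chars.join [' '] texts) = texts.any (fun s => PySem.Chars.isIn t s) := by
  intro texts
  induction texts with
  | nil =>
    simp only [PySem.Chars.join_nil, List.any_nil]
    rw [Bool.eq_false_iff, Ne, PySem.Chars.isIn_iff_infix]
    intro h
    exact hne (List.eq_nil_of_infix_nil h)
  | cons p rest ih =>
    cases rest with
    | nil =>
      simp [PySem.Chars.join_singleton]
    | cons q rest' =>
      rw [PySem.Chars.join_cons_cons,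
        show p ++ [' '] ++ PySem.Chars.join [' '] (q :: rest')
            = p ++ ' ' :: PySem.Chars.join [' '] (q :: rest') from by simp]
      rw [Bool.eq_iff_iff, PySem.Chars.isIn_iff_infix, pv_infix_nospace t hs hne,
        List.any_cons, Bool.or_eq_true_iff, ← ih]
      exact or_congr (PySem.Chars.isIn_iff_infix t p).symm (PySem.Chars.isIn_iff_infix _ _).symm

-- A's accumulator loop is 50 + 5 * (number of matching terms)
theorem pv_foldl_five (p : String → Bool) (l : List String) :
    ∀ a : Int, l.foldl (fun s x => if p x then s + 5 else s) a = a + 5 * (l.countP p : Int) := by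
  induction l with
  | nil => intro a; simp
  | cons x xs ih =>
    intro a
    rw [List.foldl_cons, List.countP_cons]
    by_cases h : p x <;> simp [h, ih, mul_add, add_assoc, add_comm]

-- every solar term is nonempty and space-free
theorem pv_terms_ok : ∀ t ∈ pvSolarTerms, ' ' ∉ t.toList ∧ t.toList ≠ [] := by decide

-- one step of B's inner loop: membership in the found-set after considering one term
theorem pv_step_mem (text : String) (fd : List String) (c t : String) :
    (t ∈ (if (!PySem.Set.contains fd c && PySem.Str.isIn c text) = true
          then PySem.Set.add fd c else fd))
    ↔ t ∈ fd ∨ (t = c ∧ PySem.Str.isIn c text = true) := by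
  have hcm : PySem.Set.contains fd c = true ↔ c ∈ fd := by
    simp [PySem.Set.contains]
  rcases Bool.eq_false_or_eq_true (PySem.Set.contains fd c) with hc | hc <;>
    rcases Bool.eq_false_or_eq_true (PySem.Str.isIn c text) with hi | hi
  case inl.inl =>
    have hm : c ∈ fd := hcm.mp hc
    rw [hc, hi]; simp
    exact fun h => h ▸ hm
  case inl.inr => rw [hc, hi]; simp
  case inr.inl =>
    have hnm : c ∉ fd := by simpa [PySem.Set.contains] using hc
    rw [hc, hi]
    simp [PySem.Set.add, PySem.Set.contains, hnm]
  case inr.inr => rw [hc, hi]; simp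

-- one step of B's inner loop keeps the found-set duplicate-free
theorem pv_step_nodup (text : String) (fd : List String) (c : String) (h : fd.Nodup) :
    (if (!PySem.Set.contains fd c && PySem.Str.isIn c text) = true
     then PySem.Set.add fd c else fd).Nodup := by
  by_cases hc : c ∈ fd
  · split <;> simp [PySem.Set.add, PySem.Set.contains, hc, h]
  · split
    · simp [PySem.Set.add, PySem.Set.contains, hc, List.nodup_append, h]
      exact fun a ha hac => hc (hac ▸ ha)
    · exact h

-- membership after B's inner term loop over one message's text
theorem pv_inner_mem (text : String) :
    ∀ (L : List String) (fd : List String) (t : String),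
      (t ∈ L.foldl (fun found term =>
          if !(PySem.Set.contains found term) && PySem.Str.isIn term text
          then PySem.Set.add found term else found) fd)
      ↔ t ∈ fd ∨ (t ∈ L ∧ PySem.Str.isIn t text = true) := by
  intro L
  induction L with
  | nil => intro fd t; simp
  | cons c L ih =>
    intro fd t
    rw [List.foldl_cons, ih, pv_step_mem]
    simp only [List.mem_cons]
    constructor
    · rintro ((h | ⟨rfl, hi⟩) | ⟨hm, hi⟩) <;> tauto
    · rintro (h | ⟨(rfl | hm), hi⟩) <;> tauto

-- B's inner loop preserves distinctness of the found-set
theorem pv_inner_nodup (text : String) :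
    ∀ (L : List String) (fd : List String), fd.Nodup →
      (L.foldl (fun found term =>
          if !(PySem.Set.contains found term) && PySem.Str.isIn term text
          then PySem.Set.add found term else found) fd).Nodup := by
  intro L
  induction L with
  | nil => intro fd h; simpa
  | cons c L ih =>
    intro fd h
    rw [List.foldl_cons]
    exact ih _ (pv_step_nodup text fd c h)

-- membership after B's whole message pass
theorem pv_outer_mem :
    ∀ (msgs : List (List (String × String))) (fd : List String) (t : String),
      (t ∈ msgs.foldl
        (fun found msg =>
          let text := PySem.Str.lower (pvContent msg)
          pvSolarTerms.foldl
            (fun found term =>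
              if !(PySem.Set.contains found term) && PySem.Str.isIn term text
              then PySem.Set.add found term else found) found) fd)
      ↔ t ∈ fd ∨ (t ∈ pvSolarTerms ∧
          ∃ m ∈ msgs, PySem.Str.isIn t (PySem.Str.lower (pvContent m)) = true) := by
  intro msgs
  induction msgs with
  | nil => intro fd t; simp
  | cons m msgs ih =>
    intro fd t
    rw [List.foldl_cons, ih, pv_inner_mem]
    constructor
    · rintro ((h | ⟨hm, hi⟩) | ⟨hm, mm, hmm, hii⟩)
      · exact Or.inl h
      · exact Or.inr ⟨hm, m, List.mem_cons_self, hi⟩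
      · exact Or.inr ⟨hm, mm, List.mem_cons_of_mem _ hmm, hii⟩
    · rintro (h | ⟨hm, mm, hmm, hii⟩)
      · exact Or.inl (Or.inl h)
      · rcases List.mem_cons.mp hmm with rfl | hmm'
        · exact Or.inl (Or.inr ⟨hm, hii⟩)
        · exact Or.inr ⟨hm, mm, hmm', hii⟩

-- B's whole message pass preserves distinctness of the found-set
theorem pv_outer_nodup :
    ∀ (msgs : List (List (String × String))) (fd : List String), fd.Nodup →
      (msgs.foldl
        (fun found msg =>
          let text := PySem.Str.lower (pvContent msg)
          pvSolarTerms.foldl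
            (fun found term =>
              if !(PySem.Set.contains found term) && PySem.Str.isIn term text
              then PySem.Set.add found term else found) found) fd).Nodup := by
  intro msgs
  induction msgs with
  | nil => intro fd h; simpa
  | cons m msgs ih =>
    intro fd h
    rw [List.foldl_cons]
    exact ih _ (pv_inner_nodup _ _ _ h)

-- ===== VERDICT (by name: the statement is the Claim_ definition above) =====
theorem evaluate_solar_expertise_py_spec : Claim_equal_evaluate_solar_expertise_py := by
  intro messages _ _
  unfold Spec_evaluate_solar_expertise_py
  -- the shared per-term predicate: the term occurs in some message's lowered content
  set q : String → Bool :=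
    fun t => messages.any (fun m => PySem.Str.isIn t (PySem.Str.lower (pvContent m))) with hq
  -- A's count equals countP q
  have hcount :
      pvSolarTerms.countP
        (fun term => PySem.Str.isIn term
          (PySem.Str.join " " (messages.map (fun msg => PySem.Str.lower (pvContent msg)))))
      = pvSolarTerms.countP q := by
    apply List.countP_congr
    intro t ht
    obtain ⟨hs, hne⟩ := pv_terms_ok t ht
    simp only [PySem.Str.isIn_eq, PySem.Str.toList_join]
    rw [show (" " : String).toList = [' '] from rfl, pv_isIn_join t.toList hs hne,
      List.map_map, List.any_map]
    simp [hq, PySem.Str.isIn_eq, Function.comp]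
  -- B's found-set has exactly countP q elements
  have hfound :
      (messages.foldl
        (fun found msg =>
          let text := PySem.Str.lower (pvContent msg)
          pvSolarTerms.foldl
            (fun found term =>
              if !(PySem.Set.contains found term) && PySem.Str.isIn term text
              then PySem.Set.add found term else found) found)
        PySem.Set.empty).length = pvSolarTerms.countP q := by
    rw [List.countP_eq_length_filter]
    apply List.Perm.length_eq
    rw [List.perm_ext_iff_of_nodup (pv_outer_nodup _ _ (by simp [PySem.Set.empty]))
      ((by decide : pvSolarTerms.Nodup).filter _)]
    intro t
    rw [pv_outer_mem, List.mem_filter]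
    simp [hq, List.any_eq_true, PySem.Set.empty]
  simp only [evaluate_solar_expertise_py, evaluate_solar_expertise_py_alt, pv_foldl_five,
    PySem.Set.len, hcount, hfound]
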